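-- pv_equiv track=rewrite | github.com/Maxd646/LeetCode-Tracker | leetcode-solutions/ pro 3581-count-odd-letters-from-number/solution.py | countOddLetters
-- ===== SOURCE A (Python) =====
-- from collections import Counter
--
-- def countOddLetters(n: int) -> int:
--     d={0:"zero",
--        1:"one",
--        2:"two",
--        3:"three",
--        4:"four",
--        5:"five",
--        6:"six",
--        7:"seven",
--        8:"eight",
--        9:"nine" }
--     word=''.join(d[int(x)] for x in str(n))
--     fre=Counter(word)
--     return sum(1 for i, ch in fre.items() if ch <2 )
-- ===== SOURCE B (Python) =====
-- def countOddLetters(n: int) -> int: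
--     # Letter-major: never builds the spelled-out word. For each letter of the
--     # fixed alphabet of digit words, total its occurrences across the
--     # digits of n via the per-word counts, and count letters whose total is one.
--     words = ["zero", "one", "two", "three", "four",
--              "five", "six", "seven", "eight", "nine"]
--     s = str(n)
--     total = 0
--     for ch in "zerontwhfuivsxg":
--         if sum(words[int(x)].count(ch) for x in s) == 1:
--             total += 1
--     return total
-- ===== Notes on version B (the rewrite author's own statement) =====
-- stated objective: alternative
-- what changed: inverts the loop structure: instead of spelling the number into a string and building a Counter over its characters, B never builds the word at all and iterates letter-major over the fixed alphabet of digit-word letters, summing each letter's per-digit-word occurrence counts over the digits of str(n) and counting the letters whose total is one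
import Mathlib
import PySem

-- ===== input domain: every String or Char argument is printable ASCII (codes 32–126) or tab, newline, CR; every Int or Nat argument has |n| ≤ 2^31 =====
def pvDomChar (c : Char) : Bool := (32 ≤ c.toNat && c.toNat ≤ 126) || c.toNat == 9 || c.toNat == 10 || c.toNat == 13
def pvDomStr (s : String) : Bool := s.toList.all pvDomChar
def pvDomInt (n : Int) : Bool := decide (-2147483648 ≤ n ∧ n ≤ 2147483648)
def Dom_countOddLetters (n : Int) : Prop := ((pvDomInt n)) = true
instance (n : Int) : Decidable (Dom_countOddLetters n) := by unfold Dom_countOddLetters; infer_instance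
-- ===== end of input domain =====

set_option maxRecDepth 8000


-- B never builds the spelled word: it loops letter-major over the fixed alphabet of digit-word letters,
-- summing each letter's per-digit-word counts over the digits of str(n) (objective: alternative).

-- ===== PORT A =====
def digitMapA : PySem.Dict Int (List Char) :=
  PySem.Dict.ofList [((0 : Int), "zero".toList), (1, "one".toList), (2, "two".toList),
    (3, "three".toList), (4, "four".toList), (5, "five".toList), (6, "six".toList),
    (7, "seven".toList), (8, "eight".toList), (9, "nine".toList)]

-- d[int(x)]: int(x) raises outside Pre_ (the '-' sign char); total form via getD under Pre_
def spellA (x : Char) : List Char :=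
  digitMapA.getD ((PySem.Int.ofChars? [x]).getD 0) []

def countOddLetters (n : Int) : Int :=
  let word := ((PySem.Int.toChars n).map spellA).flatten
  let fre := PySem.Dict.counter word
  fre.items.foldl (fun acc p => if p.2 < 2 then acc + 1 else acc) 0

-- ===== PORT B =====
def wordsB : List (List Char) :=
  ["zero".toList, "one".toList, "two".toList, "three".toList, "four".toList,
   "five".toList, "six".toList, "seven".toList, "eight".toList, "nine".toList]

-- sum(words[int(x)].count(ch) for x in s)
def letterTotal (s : List Char) (ch : Char) : Int :=
  (s.map (fun x =>
    (PySem.List.count (PySem.List.pyGetD wordsB ((PySem.Int.ofChars? [x]).getD 0) []) ch : Int))).sum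

def countOddLetters_alt (n : Int) : Int :=
  let s := PySem.Int.toChars n
  "zerontwhfuivsxg".toList.foldl
    (fun total ch => if letterTotal s ch == 1 then total + 1 else total) 0

-- ===== PRECONDITION & SPEC =====
-- A raises ValueError on negative n (int('-') on the sign character of str(n)); Pre_ excludes exactly those.
def Pre_countOddLetters (n : Int) : Prop := 0 ≤ n
instance (n : Int) : Decidable (Pre_countOddLetters n) := by unfold Pre_countOddLetters; infer_instance
def pvWitness_countOddLetters : Int := 105

def Spec_countOddLetters (n : Int) (out : Int) : Prop := out = countOddLetters_alt n
instance (n : Int) (out : Int) : Decidable (Spec_countOddLetters n out) := by unfold Spec_countOddLetters; infer_instance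

-- ===== CLAIM (what is proved, stated in full; the proofs are below) =====
def Claim_equal_countOddLetters : Prop := ∀ (n : Int), Dom_countOddLetters n → Pre_countOddLetters n → Spec_countOddLetters n (countOddLetters n)

-- ===== LEMMAS AND PROOFS =====

def alphaB : List Char := "zerontwhfuivsxg".toList

-- every char produced by Nat.toDigitsCore (base 10) is a decimal digit char (or came from acc)
theorem toDigitsCore_prop (P : Char → Prop) (h10 : ∀ k, k < 10 → P (Nat.digitChar k)) :
    ∀ (fuel n : Nat) (acc : List Char), (∀ c ∈ acc, P c) →
      ∀ c ∈ Nat.toDigitsCore 10 fuel n acc, P c := by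
  intro fuel
  induction fuel with
  | zero =>
    intro n acc hacc c hc
    simpa [Nat.toDigitsCore] using hacc c (by simpa [Nat.toDigitsCore] using hc)
  | succ f ih =>
    intro n acc hacc c hc
    have hd : P (Nat.digitChar (n % 10)) := h10 _ (Nat.mod_lt _ (by norm_num))
    rw [Nat.toDigitsCore] at hc
    by_cases h0 : n / 10 = 0
    · simp only [h0] at hc
      rcases List.mem_cons.mp hc with h | h
      · exact h ▸ hd
      · exact hacc c h
    · simp only [if_neg h0] at hc
      exact ih _ _ (by
        intro d hdm
        rcases List.mem_cons.mp hdm with h | h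
        · exact h ▸ hd
        · exact hacc d h) c hc

theorem toChars_digits (n : Int) (h : 0 ≤ n) (P : Char → Prop)
    (h10 : ∀ k, k < 10 → P (Nat.digitChar k)) :
    ∀ c ∈ PySem.Int.toChars n, P c := by
  intro c hc
  have hn : ¬ n < 0 := not_lt.mpr h
  simp only [PySem.Int.toChars, if_neg hn, Nat.toDigits] at hc
  exact toDigitsCore_prop P h10 _ _ [] (by simp) c hc

-- for digit chars, B's word lookup equals A's dict lookup
theorem lookup_eq_spell : ∀ k, k < 10 →
    PySem.List.pyGetD wordsB ((PySem.Int.ofChars? [Nat.digitChar k]).getD 0) []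
      = spellA (Nat.digitChar k) := by
  intro k hk
  interval_cases k <;> rfl

-- for digit chars, every char of the digit word lies in the alphabet
theorem spellA_0 : spellA (Nat.digitChar 0) = "zero".toList := rfl
theorem spellA_1 : spellA (Nat.digitChar 1) = "one".toList := rfl
theorem spellA_2 : spellA (Nat.digitChar 2) = "two".toList := rfl
theorem spellA_3 : spellA (Nat.digitChar 3) = "three".toList := rfl
theorem spellA_4 : spellA (Nat.digitChar 4) = "four".toList := rfl
theorem spellA_5 : spellA (Nat.digitChar 5) = "five".toList := rfl
theorem spellA_6 : spellA (Nat.digitChar 6) = "six".toList := rfl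
theorem spellA_7 : spellA (Nat.digitChar 7) = "seven".toList := rfl
theorem spellA_8 : spellA (Nat.digitChar 8) = "eight".toList := rfl
theorem spellA_9 : spellA (Nat.digitChar 9) = "nine".toList := rfl

theorem spell_subset_alpha : ∀ k, k < 10 → ∀ c ∈ spellA (Nat.digitChar k), c ∈ alphaB := by
  intro k hk
  interval_cases k
  · simpa [spellA_0] using List.all_eq_true.mp (by decide : ("zero".toList.all (fun c => decide (c ∈ alphaB))) = true)
  · simpa [spellA_1] using List.all_eq_true.mp (by decide : ("one".toList.all (fun c => decide (c ∈ alphaB))) = true)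
  · simpa [spellA_2] using List.all_eq_true.mp (by decide : ("two".toList.all (fun c => decide (c ∈ alphaB))) = true)
  · simpa [spellA_3] using List.all_eq_true.mp (by decide : ("three".toList.all (fun c => decide (c ∈ alphaB))) = true)
  · simpa [spellA_4] using List.all_eq_true.mp (by decide : ("four".toList.all (fun c => decide (c ∈ alphaB))) = true)
  · simpa [spellA_5] using List.all_eq_true.mp (by decide : ("five".toList.all (fun c => decide (c ∈ alphaB))) = true)
  · simpa [spellA_6] using List.all_eq_true.mp (by decide : ("six".toList.all (fun c => decide (c ∈ alphaB))) = true)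
  · simpa [spellA_7] using List.all_eq_true.mp (by decide : ("seven".toList.all (fun c => decide (c ∈ alphaB))) = true)
  · simpa [spellA_8] using List.all_eq_true.mp (by decide : ("eight".toList.all (fun c => decide (c ∈ alphaB))) = true)
  · simpa [spellA_9] using List.all_eq_true.mp (by decide : ("nine".toList.all (fun c => decide (c ∈ alphaB))) = true)

theorem alpha_nodup : alphaB.Nodup := by decide

-- letterTotal totals per-digit counts = count in the concatenated word
theorem letterTotal_eq_count (s : List Char)
    (hs : ∀ c ∈ s, ∃ k, k < 10 ∧ c = Nat.digitChar k) (ch : Char) :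
    letterTotal s ch = ((s.map spellA).flatten.count ch : Int) := by
  induction s with
  | nil => simp [letterTotal]
  | cons a t ih =>
    obtain ⟨k, hk, rfl⟩ := hs a (List.mem_cons_self ..)
    have iht := ih (fun c hc => hs c (List.mem_cons_of_mem _ hc))
    simp only [letterTotal, List.map_cons, List.sum_cons, List.flatten_cons,
      List.count_append] at *
    rw [lookup_eq_spell k hk, PySem.List.count_eq, iht]
    push_cast
    ring

-- chars of the spelled word lie in the alphabet
theorem word_subset_alpha (s : List Char)
    (hs : ∀ c ∈ s, ∃ k, k < 10 ∧ c = Nat.digitChar k) :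
    ∀ c ∈ (s.map spellA).flatten, c ∈ alphaB := by
  intro c hc
  rw [List.mem_flatten] at hc
  obtain ⟨l, hl, hcl⟩ := hc
  rw [List.mem_map] at hl
  obtain ⟨x, hx, rfl⟩ := hl
  obtain ⟨k, hk, rfl⟩ := hs x hx
  exact spell_subset_alpha k hk c hcl

-- the central count identity: distinct chars of w with count < 2 vs alphabet chars with count = 1
theorem countP_eq (w : List Char) (hsub : ∀ c ∈ w, c ∈ alphaB) :
    ((PySem.Set.ofList w).countP (fun k => decide ((w.count k : Int) < 2)) : Nat)
      = alphaB.countP (fun ch => (w.count ch : Int) == 1) := by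
  rw [List.countP_eq_length_filter, List.countP_eq_length_filter]
  apply List.Perm.length_eq
  apply (List.perm_ext_iff_of_nodup
    ((PySem.Set.nodup_ofList w).filter _) (alpha_nodup.filter _)).mpr
  intro c
  simp only [List.mem_filter, PySem.Set.mem_ofList, decide_eq_true_eq, beq_iff_eq]
  constructor
  · rintro ⟨hcw, hlt⟩
    have h1 : 1 ≤ w.count c := List.one_le_count_iff.mpr hcw
    have h2 : w.count c < 2 := by exact_mod_cast hlt
    exact ⟨hsub c hcw, by omega⟩
  · rintro ⟨_, h1⟩
    have h1' : w.count c = 1 := by exact_mod_cast h1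
    exact ⟨List.count_pos_iff.mp (by omega), by omega⟩

-- ===== VERDICT (by name: the statement is the Claim_ definition above) =====
theorem countOddLetters_spec : Claim_equal_countOddLetters := by
  intro n _ hpre
  unfold Spec_countOddLetters countOddLetters countOddLetters_alt
  have hs : ∀ c ∈ PySem.Int.toChars n, ∃ k, k < 10 ∧ c = Nat.digitChar k :=
    toChars_digits n hpre _ (fun k hk => ⟨k, hk, rfl⟩)
  set s := PySem.Int.toChars n with hsdef
  set w := (s.map spellA).flatten with hwdef
  -- A side → countP over the distinct chars
  have hA : (PySem.Dict.counter w).items.foldl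
      (fun acc p => if p.2 < 2 then acc + 1 else acc) (0 : Int)
      = ((PySem.Set.ofList w).countP (fun k => decide ((w.count k : Int) < 2)) : Int) := by
    rw [PySem.Dict.items_counter]
    rw [show (fun (acc : Int) (p : Char × Int) => if p.2 < 2 then acc + 1 else acc)
        = (fun acc p => if (fun (q : Char × Int) => decide (q.2 < 2)) p = true then acc + 1 else acc) by
      funext acc p; simp]
    rw [PySem.List.foldl_count_if]
    rw [List.countP_map]
    simp only [zero_add, Function.comp_def]
  -- B side → countP over the alphabet
  have hB : alphaB.foldl
      (fun total ch => if letterTotal s ch == 1 then total + 1 else total) (0 : Int)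
      = (alphaB.countP (fun ch => (w.count ch : Int) == 1) : Int) := by
    rw [show (fun (total : Int) (ch : Char) => if letterTotal s ch == 1 then total + 1 else total)
        = (fun total ch => if (fun c => letterTotal s c == 1) ch = true then total + 1 else total) by
      funext total ch; rfl]
    rw [PySem.List.foldl_count_if, zero_add]
    congr 1
    apply List.countP_congr
    intro ch _
    rw [letterTotal_eq_count s hs ch]
  show (PySem.Dict.counter w).items.foldl _ 0
      = alphaB.foldl (fun total ch => if letterTotal s ch == 1 then total + 1 else total) 0
  rw [hA, hB, countP_eq w (word_subset_alpha s hs)]
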